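-- pv_equiv track=rewrite | github.com/xiaojingxx/service-deck-builder | app.py | get_slide_number_from_line_index
-- ===== SOURCE A (Python) =====
-- def get_slide_number_from_line_index(text: str, line_index: int, auto_split: bool, lines_per_slide: int):
--     if line_index is None:
--         return None
--
--     lines = text.splitlines()
--
--     if auto_split:
--         current_verse_indexes = []
--         line_to_slide = {}
--         slide_num = 1
--
--         for idx, raw_line in enumerate(lines):
--             stripped = raw_line.strip()
--
--             if stripped == "":
--                 if current_verse_indexes:
--                     for j in range(0, len(current_verse_indexes), lines_per_slide):
--                         chunk = current_verse_indexes[j:j + lines_per_slide]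
--                         for original_idx in chunk:
--                             line_to_slide[original_idx] = slide_num
--                         slide_num += 1
--                     current_verse_indexes = []
--             else:
--                 current_verse_indexes.append(idx)
--
--         if current_verse_indexes:
--             for j in range(0, len(current_verse_indexes), lines_per_slide):
--                 chunk = current_verse_indexes[j:j + lines_per_slide]
--                 for original_idx in chunk:
--                     line_to_slide[original_idx] = slide_num
--                 slide_num += 1
--
--         return line_to_slide.get(line_index)
--
--     slide_num = 1
--     in_slide = False
--
--     for idx, raw_line in enumerate(lines):
--         stripped = raw_line.strip()
--
--         if stripped == "":
--             if in_slide: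
--                 slide_num += 1
--                 in_slide = False
--         else:
--             in_slide = True
--             if idx == line_index:
--                 return slide_num
--
--     return None
-- ===== SOURCE B (Python) =====
-- def get_slide_number_from_line_index(text: str, line_index: int, auto_split: bool, lines_per_slide: int):
--     if line_index is None:
--         return None
--
--     lines = text.splitlines()
--
--     if auto_split:
--         # Single pass: collect the current verse's line indexes; on a blank line
--         # (or the appended sentinel at end-of-input) resolve the finished verse:
--         # if the target line is in it, its slide is slide_num + position // lines_per_slide;
--         # otherwise advance slide_num by the verse's chunk count and go on.
--         slide_num = 1
--         verse = []
--         for idx, raw_line in enumerate(lines + [""]):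
--             if raw_line.strip():
--                 verse.append(idx)
--             elif verse:
--                 if line_index in verse:
--                     return slide_num + verse.index(line_index) // lines_per_slide
--                 slide_num += -(-len(verse) // lines_per_slide)
--                 verse = []
--         return None
--
--     slide_num = 1
--     in_slide = False
--
--     for idx, raw_line in enumerate(lines):
--         stripped = raw_line.strip()
--
--         if stripped == "":
--             if in_slide:
--                 slide_num += 1
--                 in_slide = False
--         else:
--             in_slide = True
--             if idx == line_index:
--                 return slide_num
--
--     return None
-- ===== Notes on version B (the rewrite author's own statement) =====
-- stated objective: simpler
-- what changed: The auto_split branch no longer builds the full line-index-to-slide dict: a single scan accumulates the current verse and, when the verse closes (blank line or end sentinel), either returns slide_num + position // lines_per_slide immediately if the target line is in the verse, or advances slide_num by the verse's chunk count. …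
-- outside the precondition, e.g. on get_slide_number_from_line_index('hi', 0, True, -1): A returns None, B returns 1
import Mathlib
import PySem

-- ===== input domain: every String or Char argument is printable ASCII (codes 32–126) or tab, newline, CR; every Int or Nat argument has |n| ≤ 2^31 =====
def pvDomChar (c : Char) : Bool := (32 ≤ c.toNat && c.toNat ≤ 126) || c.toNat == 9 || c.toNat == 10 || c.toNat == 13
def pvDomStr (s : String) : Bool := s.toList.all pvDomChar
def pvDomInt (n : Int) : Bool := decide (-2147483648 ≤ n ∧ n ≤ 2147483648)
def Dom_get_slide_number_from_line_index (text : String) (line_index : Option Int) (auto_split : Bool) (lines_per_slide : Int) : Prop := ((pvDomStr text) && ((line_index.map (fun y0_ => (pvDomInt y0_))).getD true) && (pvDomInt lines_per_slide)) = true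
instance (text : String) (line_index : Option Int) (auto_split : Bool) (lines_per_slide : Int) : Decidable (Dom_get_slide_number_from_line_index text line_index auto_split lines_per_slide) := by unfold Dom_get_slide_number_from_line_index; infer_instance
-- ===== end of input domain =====

-- B replaces A's dict-building auto_split pass by a single verse scan that returns the slide as
-- soon as the verse containing the target line is completed (objective: simpler); the non-auto
-- branch is untouched (shared helper pvNonAutoGo, identical code in both Pythons).

-- shared non-auto_split loop (textually identical in Source A and Source B)
def pvNonAutoGo (li : Int) : List (Int × String) → Int → Bool → Option Int
  | [], _, _ => none
  | (idx, raw) :: rest, sn, ins =>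
    if PySem.Str.strip raw = "" then
      if ins then pvNonAutoGo li rest (sn + 1) false else pvNonAutoGo li rest sn ins
    else if idx = li then some sn
    else pvNonAutoGo li rest sn true

-- ===== PORT A =====
-- A's inner verse processing: for j in range(0, len(cvi), lps): assign slide_num to cvi[j:j+lps]
def pvAVerse (lps : Int) (cvi : List Int) (d : PySem.Dict Int Int) (sn : Int) : PySem.Dict Int Int × Int :=
  (PySem.List.pyRange 0 (cvi.length : Int) lps).foldl
    (fun st j =>
      ((PySem.List.slice cvi (some j) (some (j + lps))).foldl (fun dd oi => dd.insert oi st.2) st.1,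
       st.2 + 1))
    (d, sn)

-- A's main loop body over (idx, raw_line); state = (current_verse_indexes, line_to_slide, slide_num)
def pvAStep (lps : Int) (st : List Int × PySem.Dict Int Int × Int) (p : Int × String) : List Int × PySem.Dict Int Int × Int :=
  if PySem.Str.strip p.2 = "" then
    if st.1 ≠ [] then
      let v := pvAVerse lps st.1 st.2.1 st.2.2
      ([], v.1, v.2)
    else st
  else (st.1 ++ [p.1], st.2.1, st.2.2)

def get_slide_number_from_line_index (text : String) (line_index : Option Int) (auto_split : Bool) (lines_per_slide : Int) : Option Int :=
  match line_index with
  | none => none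
  | some li =>
    let lines := PySem.Str.splitlines text
    if auto_split then
      let st := (PySem.List.enumerate lines).foldl (pvAStep lines_per_slide) ([], PySem.Dict.empty, 1)
      (if st.1 ≠ [] then (pvAVerse lines_per_slide st.1 st.2.1 st.2.2).1 else st.2.1).get? li
    else
      pvNonAutoGo li (PySem.List.enumerate lines) 1 false

-- ===== PORT B =====
-- Source B's auto_split scan: verse accumulates indexes; on a blank line (incl. the appended "" sentinel)
-- either return slide_num + verse.index(li) // lps, or bump slide_num by the chunk count -(-len//lps)
def pvBGo (li lps : Int) : List (Int × String) → Int → List Int → Option Int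
  | [], _, _ => none
  | (idx, raw) :: rest, sn, verse =>
    if PySem.Str.strip raw ≠ "" then pvBGo li lps rest sn (verse ++ [idx])
    else if verse ≠ [] then
      match PySem.List.index? verse li with
      | some p => some (sn + PySem.Int.floordiv (p : Int) lps)
      | none => pvBGo li lps rest (sn + -(PySem.Int.floordiv (-(verse.length : Int)) lps)) []
    else pvBGo li lps rest sn verse

def get_slide_number_from_line_index_alt (text : String) (line_index : Option Int) (auto_split : Bool) (lines_per_slide : Int) : Option Int :=
  match line_index with
  | none => none
  | some li =>
    let lines := PySem.Str.splitlines text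
    if auto_split then
      pvBGo li lines_per_slide (PySem.List.enumerate (lines ++ [""])) 1 []
    else
      pvNonAutoGo li (PySem.List.enumerate lines) 1 false

-- ===== PRECONDITION & SPEC =====
-- Pre_ excludes auto_split calls with lines_per_slide ≤ 0 on text containing a non-blank line
-- (outside the natural domain of a positive slide size): there A raises ValueError for step 0 and
-- silently assigns no slides for negative steps, an accident B's chunk arithmetic does not share.
def Pre_get_slide_number_from_line_index (text : String) (line_index : Option Int) (auto_split : Bool) (lines_per_slide : Int) : Prop :=
  auto_split = true → lines_per_slide ≤ 0 → line_index ≠ none →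
    ∀ s ∈ PySem.Str.splitlines text, PySem.Str.strip s = ""
instance (text : String) (line_index : Option Int) (auto_split : Bool) (lines_per_slide : Int) : Decidable (Pre_get_slide_number_from_line_index text line_index auto_split lines_per_slide) := by unfold Pre_get_slide_number_from_line_index; infer_instance

def pvWitness_get_slide_number_from_line_index : String × Option Int × Bool × Int := ("verse one\nline two\n\nverse two", some 1, true, 2)

def Spec_get_slide_number_from_line_index (text : String) (line_index : Option Int) (auto_split : Bool) (lines_per_slide : Int) (out : Option Int) : Prop := out = get_slide_number_from_line_index_alt text line_index auto_split lines_per_slide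
instance (text : String) (line_index : Option Int) (auto_split : Bool) (lines_per_slide : Int) (out : Option Int) : Decidable (Spec_get_slide_number_from_line_index text line_index auto_split lines_per_slide out) := by unfold Spec_get_slide_number_from_line_index; infer_instance

-- ===== CLAIM (what is proved, stated in full; the proofs are below) =====
def Claim_equal_get_slide_number_from_line_index : Prop := ∀ (text : String) (line_index : Option Int) (auto_split : Bool) (lines_per_slide : Int), Dom_get_slide_number_from_line_index text line_index auto_split lines_per_slide → Pre_get_slide_number_from_line_index text line_index auto_split lines_per_slide → Spec_get_slide_number_from_line_index text line_index auto_split lines_per_slide (get_slide_number_from_line_index text line_index auto_split lines_per_slide)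

-- ===== LEMMAS AND PROOFS =====

theorem pv_strip_empty : PySem.Str.strip "" = "" := by decide

theorem pv_enum_snd_mem {α : Type} {xs : List α} {s : Int} {q : Int × α}
    (h : q ∈ PySem.List.enumerate xs s) : q.2 ∈ xs := by
  rw [PySem.List.mem_enumerate_iff] at h
  obtain ⟨k, hk, rfl⟩ := h
  exact List.getElem_mem hk

-- proof-only names for A's pieces (no lets, so that rewriting is syntactic)
def pvChunkStep (k : Int) (cvi : List Int) (st : PySem.Dict Int Int × Int) (t : Nat) :
    PySem.Dict Int Int × Int :=
  ((PySem.List.slice cvi (some (0 + k * (t : Int))) (some (0 + k * (t : Int) + k))).foldl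
     (fun dd oi => dd.insert oi st.2) st.1, st.2 + 1)

theorem pvChunkStep_fst (k : Int) (cvi : List Int) (st : PySem.Dict Int Int × Int) (t : Nat) :
    (pvChunkStep k cvi st t).1
    = (PySem.List.slice cvi (some (0 + k * (t : Int))) (some (0 + k * (t : Int) + k))).foldl
        (fun dd oi => dd.insert oi st.2) st.1 := rfl

theorem pvChunkStep_snd (k : Int) (cvi : List Int) (st : PySem.Dict Int Int × Int) (t : Nat) :
    (pvChunkStep k cvi st t).2 = st.2 + 1 := rfl

def pvAFin (k l : Int) (pairs : List (Int × String)) (st0 : List Int × PySem.Dict Int Int × Int) :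
    Option Int :=
  (if (pairs.foldl (pvAStep k) st0).1 ≠ [] then
     (pvAVerse k (pairs.foldl (pvAStep k) st0).1 (pairs.foldl (pvAStep k) st0).2.1
        (pairs.foldl (pvAStep k) st0).2.2).1
   else (pairs.foldl (pvAStep k) st0).2.1).get? l

theorem pvAFin_cons (k l : Int) (q : Int × String) (pairs : List (Int × String))
    (st0 : List Int × PySem.Dict Int Int × Int) :
    pvAFin k l (q :: pairs) st0 = pvAFin k l pairs (pvAStep k st0 q) := by
  unfold pvAFin
  rw [List.foldl_cons]

theorem pvAFin_nil (k l : Int) (cvi : List Int) (d : PySem.Dict Int Int) (sn : Int) :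
    pvAFin k l [] (cvi, d, sn)
    = (if cvi ≠ [] then (pvAVerse k cvi d sn).1 else d).get? l := rfl

-- inserting a constant value v for every key of ch: the lookup at l
theorem pv_ins_fold (ch : List Int) (d : PySem.Dict Int Int) (v l : Int) :
    (ch.foldl (fun dd oi => dd.insert oi v) d).get? l = if l ∈ ch then some v else d.get? l := by
  induction ch generalizing d with
  | nil => simp
  | cons x t ih =>
    simp only [List.foldl_cons, ih, List.mem_cons]
    by_cases hx : l = x <;> by_cases hm : l ∈ t <;>
      simp [hx, hm, PySem.Dict.get?_insert]

-- the slide counter of A's verse fold just counts iterations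
theorem pv_fold_chunk_snd (k : Int) (cvi : List Int) (d : PySem.Dict Int Int) (sn : Int)
    (m : Nat) :
    ((List.range m).foldl (pvChunkStep k cvi) (d, sn)).2 = sn + m := by
  induction m with
  | zero => simp
  | succ m ih =>
    rw [List.range_succ, List.foldl_append, List.foldl_cons, List.foldl_nil,
      pvChunkStep_snd, ih]
    push_cast; ring

-- A's verse fold never touches a key outside cvi
theorem pv_averse_not_mem (cvi : List Int) (lps : Int) (l : Int) (hl : l ∉ cvi)
    (js : List Int) (d : PySem.Dict Int Int) (sn : Int) :
    ((js.foldl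
      (fun st j =>
        ((PySem.List.slice cvi (some j) (some (j + lps))).foldl (fun dd oi => dd.insert oi st.2) st.1,
         st.2 + 1)) (d, sn)).1).get? l = d.get? l := by
  induction js generalizing d sn with
  | nil => rfl
  | cons x t ih =>
    simp only [List.foldl_cons]
    rw [ih, pv_ins_fold]
    have : l ∉ PySem.List.slice cvi (some x) (some (x + lps)) :=
      fun h => hl (PySem.List.mem_of_mem_slice _ _ _ h)
    simp [this]

theorem pv_averse_not_mem' (cvi : List Int) (lps : Int) (l : Int) (hl : l ∉ cvi)
    (d : PySem.Dict Int Int) (sn : Int) :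
    (pvAVerse lps cvi d sn).1.get? l = d.get? l :=
  pv_averse_not_mem cvi lps l hl _ d sn

theorem pv_mem_drop_take {cvi : List Int} {l : Int} {p : Nat}
    (hnd : cvi.Nodup) (hp : PySem.List.index? cvi l = some p) (a b : Nat) :
    l ∈ (cvi.drop a).take b ↔ a ≤ p ∧ p < a + b := by
  obtain ⟨hplen, hget, -⟩ := PySem.List.getElem_of_index?_eq_some hp
  constructor
  · intro hmem
    obtain ⟨i, hi, hei⟩ := List.getElem_of_mem hmem
    have hi' : i < min b (cvi.length - a) := by
      simpa [List.length_take, List.length_drop] using hi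
    have hai : a + i < cvi.length := by omega
    rw [List.getElem_take, List.getElem_drop] at hei
    have : a + i = p := (hnd.getElem_inj_iff).mp (hei.trans hget.symm)
    omega
  · rintro ⟨h1, h2⟩
    have hlen : p - a < ((cvi.drop a).take b).length := by
      simp only [List.length_take, List.length_drop]
      omega
    refine List.mem_iff_getElem.mpr ⟨p - a, hlen, ?_⟩
    rw [List.getElem_take, List.getElem_drop]
    have hpa : a + (p - a) = p := by omega
    simp only [hpa]
    exact hget

-- the chunk slice cvi[k*t : k*t+k] contains l iff k*t ≤ p < k*t+k
theorem pv_mem_chunk {cvi : List Int} {l : Int} {p : Nat} {k : Int} (hk : 1 ≤ k)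
    (hnd : cvi.Nodup) (hp : PySem.List.index? cvi l = some p) (t : Nat) :
    l ∈ PySem.List.slice cvi (some (0 + k * (t : Int))) (some (0 + k * (t : Int) + k)) ↔
      (k * t ≤ (p : Int) ∧ (p : Int) < k * t + k) := by
  have hkt : (0:Int) ≤ k * (t : Int) := mul_nonneg (by omega) (Int.natCast_nonneg t)
  rw [PySem.List.slice_toNat cvi (by omega) (by omega)]
  rw [pv_mem_drop_take hnd hp]
  generalize hg : k * (t : Int) = kt at *
  omega

-- lookup after the first m chunks of A's verse fold
theorem pv_averse_get (cvi : List Int) (k : Int) (hk : 1 ≤ k) (l : Int) {p : Nat}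
    (hnd : cvi.Nodup) (hp : PySem.List.index? cvi l = some p)
    (d : PySem.Dict Int Int) (sn : Int) (m : Nat) :
    (((List.range m).foldl (pvChunkStep k cvi) (d, sn)).1).get? l
    = if (p : Int) < k * m then some (sn + PySem.Int.floordiv (p : Int) k) else d.get? l := by
  induction m with
  | zero =>
    rw [show (k * ((0:Nat) : Int)) = 0 by norm_num]
    rw [if_neg (by omega)]
    simp
  | succ m ih =>
    rw [List.range_succ, List.foldl_append, List.foldl_cons, List.foldl_nil]
    rw [pvChunkStep_fst, pv_ins_fold, pv_fold_chunk_snd, ih]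
    have hy : ((m + 1 : Nat) : Int) = (m : Int) + 1 := by push_cast; ring
    rw [hy, mul_add, mul_one]
    by_cases hin : l ∈ PySem.List.slice cvi (some (0 + k * (m : Int))) (some (0 + k * (m : Int) + k))
    · have hb := (pv_mem_chunk hk hnd hp m).mp hin
      have hfd : PySem.Int.floordiv (p : Int) k = m := by
        rw [PySem.Int.floordiv_eq_iff_of_pos (by omega : (0:Int) < k)]
        constructor <;> linarith [hb.1, hb.2]
      rw [if_pos hin, if_pos (by linarith [hb.2]), hfd]
    · have hb := fun h => hin ((pv_mem_chunk hk hnd hp m).mpr h)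
      rw [if_neg hin]
      by_cases h3 : (p : Int) < k * m
      · rw [if_pos h3, if_pos (by linarith)]
      · have h4 : ¬ ((p : Int) < k * m + k) := by
          intro h5
          exact hb ⟨not_lt.mp h3, h5⟩
        rw [if_neg h3, if_neg h4]

-- number of chunks of A's verse loop, as B's ceiling expression; and it covers the verse
theorem pv_chunk_count (n k : Int) (hk : 1 ≤ k) (hn : 1 ≤ n) :
    ((((n - 0 + k - 1) / k).toNat : Int) = -(PySem.Int.floordiv (-n) k))
    ∧ n ≤ k * (((n - 0 + k - 1) / k).toNat : Int) := by
  have hkpos : (0:Int) < k := by omega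
  set q := (n - 0 + k - 1) / k with hq
  have hq0 : 0 ≤ q := Int.ediv_nonneg (by omega) (by omega)
  have h1 : q * k ≤ n - 0 + k - 1 := Int.ediv_mul_le _ (by omega)
  have h2 : n - 0 + k - 1 < (q + 1) * k := Int.lt_ediv_add_one_mul_self _ hkpos
  rw [add_mul, one_mul] at h2
  have h3 : n ≤ q * k := by omega
  have hcast : ((q.toNat : Int)) = q := Int.toNat_of_nonneg hq0
  rw [hcast]
  constructor
  · rw [eq_comm, PySem.Int.neg_floordiv_neg_eq_iff_of_pos hkpos]
    constructor
    · nlinarith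
    · exact h3
  · linarith [h3]

-- full characterisation of pvAVerse for 1 ≤ lps when the target line is in the verse
theorem pv_averse_found (cvi : List Int) (k : Int) (hk : 1 ≤ k) (l : Int) {p : Nat}
    (hnd : cvi.Nodup) (hp : PySem.List.index? cvi l = some p) (hne : cvi ≠ [])
    (d : PySem.Dict Int Int) (sn : Int) :
    (pvAVerse k cvi d sn).1.get? l = some (sn + PySem.Int.floordiv (p : Int) k) := by
  have hkpos : (0:Int) < k := by omega
  obtain ⟨hplen, -, -⟩ := PySem.List.getElem_of_index?_eq_some hp
  have hlen : (0:Int) < (cvi.length : Int) := by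
    have := List.length_pos_iff.mpr hne
    omega
  unfold pvAVerse
  rw [PySem.List.pyRange_of_pos _ _ hkpos, if_pos hlen, List.foldl_map]
  change (((List.range (((cvi.length : Int) - 0 + k - 1) / k).toNat).foldl
    (pvChunkStep k cvi) (d, sn)).1).get? l = _
  rw [pv_averse_get cvi k hk l hnd hp d sn]
  obtain ⟨-, hcov⟩ := pv_chunk_count (cvi.length : Int) k hk (by omega)
  rw [if_pos (by
    have hpn : ((p : Int)) < (cvi.length : Int) := by exact_mod_cast hplen
    linarith)]

-- the slide counter after a whole verse, as B's ceiling bump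
theorem pv_averse_snd_eq (cvi : List Int) (k : Int) (hk : 1 ≤ k) (hne : cvi ≠ [])
    (d : PySem.Dict Int Int) (sn : Int) :
    (pvAVerse k cvi d sn).2 = sn + -(PySem.Int.floordiv (-(cvi.length : Int)) k) := by
  have hkpos : (0:Int) < k := by omega
  have hlen : (0:Int) < (cvi.length : Int) := by
    have := List.length_pos_iff.mpr hne
    omega
  unfold pvAVerse
  rw [PySem.List.pyRange_of_pos _ _ hkpos, if_pos hlen, List.foldl_map]
  change ((List.range (((cvi.length : Int) - 0 + k - 1) / k).toNat).foldl
    (pvChunkStep k cvi) (d, sn)).2 = _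
  rw [pv_fold_chunk_snd]
  obtain ⟨hceil, -⟩ := pv_chunk_count (cvi.length : Int) k hk (by omega)
  rw [hceil]

-- A's tail, once the target key can no longer occur, keeps the lookup unchanged
theorem pv_a_persist (k l : Int) :
    ∀ (pairs : List (Int × String)), (∀ q ∈ pairs, q.1 ≠ l) →
    ∀ (cvi : List Int) (d : PySem.Dict Int Int) (sn : Int), l ∉ cvi →
    pvAFin k l pairs (cvi, d, sn) = d.get? l := by
  intro pairs
  induction pairs with
  | nil =>
    intro _ cvi d sn hcv
    rw [pvAFin_nil]
    by_cases h : cvi = [] <;> simp [h, pv_averse_not_mem' cvi k l hcv d sn]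
  | cons q rest ih =>
    intro hp cvi d sn hcv
    have hq1 : q.1 ≠ l := hp q (by simp)
    have hrest : ∀ r ∈ rest, r.1 ≠ l := fun r hr => hp r (by simp [hr])
    rw [pvAFin_cons]
    by_cases hs : PySem.Str.strip q.2 = ""
    · by_cases hcvi : cvi = []
      · have hstep : pvAStep k (cvi, d, sn) q = (cvi, d, sn) := by
          simp [pvAStep, hs, hcvi]
        rw [hstep]
        exact ih hrest cvi d sn hcv
      · have hstep : pvAStep k (cvi, d, sn) q
            = ([], (pvAVerse k cvi d sn).1, (pvAVerse k cvi d sn).2) := by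
          simp [pvAStep, hs, hcvi]
        rw [hstep, ih hrest [] (pvAVerse k cvi d sn).1 (pvAVerse k cvi d sn).2 (by simp)]
        exact pv_averse_not_mem' cvi k l hcv d sn
    · have hstep : pvAStep k (cvi, d, sn) q = (cvi ++ [q.1], d, sn) := by
        simp [pvAStep, hs]
      rw [hstep]
      refine ih hrest (cvi ++ [q.1]) d sn ?_
      simp only [List.mem_append, List.mem_singleton]
      rintro (h | h)
      · exact hcv h
      · exact hq1 h.symm

-- main invariant: A's remaining pass (+ final flush + lookup) equals B's remaining scan
theorem pv_main (k l : Int) (hk : 1 ≤ k) (m : Int) :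
    ∀ (pairs : List (Int × String)) (cvi : List Int) (d : PySem.Dict Int Int) (sn : Int),
    d.get? l = none → cvi.Nodup → (∀ q ∈ pairs, q.1 ∉ cvi) → (pairs.map (·.1)).Nodup →
    pvAFin k l pairs (cvi, d, sn) = pvBGo l k (pairs ++ [(m, "")]) sn cvi := by
  intro pairs
  induction pairs with
  | nil =>
    intro cvi d sn hd hnd h3 h4
    rw [pvAFin_nil, List.nil_append]
    by_cases hcvi : cvi = []
    · subst hcvi
      simp [pvBGo, pv_strip_empty, hd]
    · cases hidx : PySem.List.index? cvi l with
      | none =>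
        have hidx' : List.idxOf? l cvi = none := by simpa using hidx
        have hlnot : l ∉ cvi := (PySem.List.index?_eq_none_iff cvi l).mp hidx
        rw [if_pos hcvi, pv_averse_not_mem' cvi k l hlnot d sn, hd]
        simp [pvBGo, pv_strip_empty, hcvi, hidx']
      | some p =>
        have hidx' : List.idxOf? l cvi = some p := by simpa using hidx
        rw [if_pos hcvi, pv_averse_found cvi k hk l hnd hidx hcvi d sn]
        simp [pvBGo, pv_strip_empty, hcvi, hidx']
  | cons q rest ih =>
    intro cvi d sn hd hnd h3 h4
    obtain ⟨idx, raw⟩ := q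
    have h4' : (rest.map (·.1)).Nodup := by simpa using h4.of_cons
    rw [pvAFin_cons, List.cons_append]
    by_cases hs : PySem.Str.strip raw = ""
    · by_cases hcvi : cvi = []
      · have hstep : pvAStep k (cvi, d, sn) (idx, raw) = (cvi, d, sn) := by
          simp [pvAStep, hs, hcvi]
        rw [hstep, ih cvi d sn hd hnd (fun r hr => h3 r (by simp [hr])) h4']
        have hbg : pvBGo l k ((idx, raw) :: (rest ++ [(m, "")])) sn cvi
            = pvBGo l k (rest ++ [(m, "")]) sn cvi := by
          simp [pvBGo, hs, hcvi]
        rw [hbg]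
      · have hstep : pvAStep k (cvi, d, sn) (idx, raw)
            = ([], (pvAVerse k cvi d sn).1, (pvAVerse k cvi d sn).2) := by
          simp [pvAStep, hs, hcvi]
        rw [hstep]
        cases hidx : PySem.List.index? cvi l with
        | some p =>
          have hidx' : List.idxOf? l cvi = some p := by simpa using hidx
          have hlmem : l ∈ cvi := by
            have := (PySem.List.index?_isSome_iff cvi l).mp (by rw [hidx]; rfl)
            exact this
          have hrest_ne : ∀ r ∈ rest, r.1 ≠ l := fun r hr hrl =>
            (h3 r (by simp [hr])) (hrl ▸ hlmem)
          rw [pv_a_persist k l rest hrest_ne [] (pvAVerse k cvi d sn).1 (pvAVerse k cvi d sn).2 (by simp)]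
          rw [pv_averse_found cvi k hk l hnd hidx hcvi d sn]
          have hbg : pvBGo l k ((idx, raw) :: (rest ++ [(m, "")])) sn cvi
              = some (sn + PySem.Int.floordiv (p : Int) k) := by
            simp [pvBGo, hs, hcvi, hidx']
          rw [hbg]
        | none =>
          have hidx' : List.idxOf? l cvi = none := by simpa using hidx
          have hlnot : l ∉ cvi := (PySem.List.index?_eq_none_iff cvi l).mp hidx
          have hd' : (pvAVerse k cvi d sn).1.get? l = none := by
            rw [pv_averse_not_mem' cvi k l hlnot d sn]; exact hd
          rw [ih [] (pvAVerse k cvi d sn).1 (pvAVerse k cvi d sn).2 hd' (by simp)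
            (by simp) h4']
          rw [pv_averse_snd_eq cvi k hk hcvi d sn]
          have hbg : pvBGo l k ((idx, raw) :: (rest ++ [(m, "")])) sn cvi
              = pvBGo l k (rest ++ [(m, "")])
                  (sn + -(PySem.Int.floordiv (-(cvi.length : Int)) k)) [] := by
            simp [pvBGo, hs, hcvi, hidx']
          rw [hbg]
    · -- non-blank line: both sides extend the verse with idx
      have hidxmem : idx ∉ cvi := h3 (idx, raw) (by simp)
      have hidxrest : idx ∉ rest.map (·.1) := by
        have h4m : (idx :: rest.map (·.1)).Nodup := by simpa using h4
        exact (List.nodup_cons.mp h4m).1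
      have hstep : pvAStep k (cvi, d, sn) (idx, raw) = (cvi ++ [idx], d, sn) := by
        simp [pvAStep, hs]
      have hnd' : (cvi ++ [idx]).Nodup := by
        rw [List.nodup_append]
        refine ⟨hnd, List.nodup_singleton idx, ?_⟩
        intro a ha b hb
        simp only [List.mem_singleton] at hb
        subst hb
        exact fun h => hidxmem (h ▸ ha)
      have hh3 : ∀ r ∈ rest, r.1 ∉ cvi ++ [idx] := by
        intro r hr
        simp only [List.mem_append, List.mem_singleton]
        rintro (h | h)
        · exact h3 r (by simp [hr]) h
        · exact hidxrest (List.mem_map.mpr ⟨r, hr, h⟩)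
      rw [hstep, ih (cvi ++ [idx]) d sn hd hnd' hh3 h4']
      have hbg : pvBGo l k ((idx, raw) :: (rest ++ [(m, "")])) sn cvi
          = pvBGo l k (rest ++ [(m, "")]) sn (cvi ++ [idx]) := by
        simp [pvBGo, hs]
      rw [hbg]

-- all-blank text, auto_split: A's loop leaves its state untouched
theorem pv_a_blank (k : Int) (pairs : List (Int × String))
    (hb : ∀ q ∈ pairs, PySem.Str.strip q.2 = "") (d : PySem.Dict Int Int) (sn : Int) :
    pairs.foldl (pvAStep k) ([], d, sn) = ([], d, sn) := by
  induction pairs with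
  | nil => rfl
  | cons x t ih =>
    have hx := hb x (by simp)
    simp only [List.foldl_cons, pvAStep, hx]
    simp only [ne_eq, not_true_eq_false, if_false]
    exact ih (fun q hq => hb q (by simp [hq]))

-- all-blank scan on B's side returns none
theorem pv_b_blank (l k : Int) (pairs : List (Int × String))
    (hb : ∀ q ∈ pairs, PySem.Str.strip q.2 = "") (sn : Int) :
    pvBGo l k pairs sn [] = none := by
  induction pairs generalizing sn with
  | nil => rfl
  | cons x t ih =>
    obtain ⟨idx, raw⟩ := x
    have hx := hb (idx, raw) (by simp)
    simp only [pvBGo, hx]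
    simp [ih (fun q hq => hb q (by simp [hq]))]

-- ===== VERDICT (by name: the statement is the Claim_ definition above) =====
theorem get_slide_number_from_line_index_spec : Claim_equal_get_slide_number_from_line_index := by
  unfold Claim_equal_get_slide_number_from_line_index
  intro text li auto lps hdom hpre
  unfold Spec_get_slide_number_from_line_index
  cases li with
  | none => rfl
  | some l =>
    cases auto with
    | false => rfl
    | true =>
      by_cases hk : 1 ≤ lps
      · show pvAFin lps l (PySem.List.enumerate (PySem.Str.splitlines text))
            ([], PySem.Dict.empty, 1)
          = pvBGo l lps (PySem.List.enumerate (PySem.Str.splitlines text ++ [""])) 1 []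
        rw [PySem.List.enumerate_append]
        rw [show PySem.List.enumerate [""]
              ((0:Int) + ((PySem.Str.splitlines text).length : Int))
            = [(((0:Int) + ((PySem.Str.splitlines text).length : Int)), "")] from rfl]
        have h4 : ((PySem.List.enumerate (PySem.Str.splitlines text)).map (·.1)).Nodup := by
          rw [PySem.List.map_fst_enumerate]
          exact PySem.List.nodup_pyRange_one _ _
        exact pv_main lps l hk ((0:Int) + ((PySem.Str.splitlines text).length : Int))
          (PySem.List.enumerate (PySem.Str.splitlines text)) [] PySem.Dict.empty 1
          (PySem.Dict.get?_empty l) List.nodup_nil (by simp) h4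
      · have hall : ∀ s ∈ PySem.Str.splitlines text, PySem.Str.strip s = "" :=
          hpre rfl (by omega) (by simp)
        have hbA : ∀ q ∈ PySem.List.enumerate (PySem.Str.splitlines text),
            PySem.Str.strip q.2 = "" := fun q hq => hall q.2 (pv_enum_snd_mem hq)
        have hbB : ∀ q ∈ PySem.List.enumerate (PySem.Str.splitlines text ++ [""]),
            PySem.Str.strip q.2 = "" := by
          intro q hq
          rcases List.mem_append.mp (pv_enum_snd_mem hq) with h | h
          · exact hall q.2 h
          · simp only [List.mem_singleton] at h
            rw [h]; exact pv_strip_empty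
        show pvAFin lps l (PySem.List.enumerate (PySem.Str.splitlines text))
            ([], PySem.Dict.empty, 1)
          = pvBGo l lps (PySem.List.enumerate (PySem.Str.splitlines text ++ [""])) 1 []
        rw [pv_b_blank l lps _ hbB 1]
        unfold pvAFin
        rw [pv_a_blank lps _ hbA PySem.Dict.empty 1]
        simp
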